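-- pv_equiv track=rewrite | github.com/chenqi-li/Python-CSC180-Intro-to-Programming | Exercises/Week 3/recursion.py | bernoulliTriangle
-- ===== SOURCE A (Python) =====
-- def condenseBT(list):
--    condList = []
--    if list == [1]:
--       return [1,2]
--    elif list == [1,2]:
--       return [1, 3, 4]
--    else:
--       for i in range(0, len(list)-1, 1):
--          condList += [list[i]+list[i+1]]
--
--    return [1] + condList + [2*list[len(list)-1]]
--
-- def bernoulliTriangle(n):
--    seq = [1, 2]
--    if n == 1:
--       return [1]
--    elif n == 2:
--       return [1, 2]
--    else:
--       for i in range(0, n-2, 1):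
--          seq = condenseBT(seq)
--       return seq
-- ===== SOURCE B (Python) =====
-- def bernoulliTriangle(n):
--     # Row n as prefix sums of binomial coefficients C(n-1, j), one O(n) pass.
--     if n == 1:
--         return [1]
--     if n <= 2:
--         return [1, 2]
--     row = []
--     c = 1  # C(n-1, j)
--     s = 0  # running prefix sum
--     for j in range(n):
--         s += c
--         row.append(s)
--         c = c * (n - 1 - j) // (j + 1)
--     return row
-- ===== Notes on version B (the rewrite author's own statement) =====
-- stated objective: faster
-- what changed: Instead of iterating the pairwise-sum condensation n-2 times (rebuilding the whole row each time), B generates row n directly in one pass as running prefix sums of the binomial coefficients C(n-1,j), updating the coefficient multiplicatively.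
import Mathlib
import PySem

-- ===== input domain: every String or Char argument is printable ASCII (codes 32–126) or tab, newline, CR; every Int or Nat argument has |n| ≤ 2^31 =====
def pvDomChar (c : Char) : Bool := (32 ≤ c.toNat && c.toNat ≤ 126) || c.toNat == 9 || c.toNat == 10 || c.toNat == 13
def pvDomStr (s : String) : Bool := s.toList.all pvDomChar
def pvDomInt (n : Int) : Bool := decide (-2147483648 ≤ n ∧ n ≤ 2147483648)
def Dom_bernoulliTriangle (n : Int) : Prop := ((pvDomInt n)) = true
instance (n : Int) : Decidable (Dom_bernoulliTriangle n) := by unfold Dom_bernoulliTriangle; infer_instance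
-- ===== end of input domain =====

-- B replaces A's repeated O(n^2) row condensation by one O(n) pass of prefix sums of
-- binomial coefficients (objective: faster, asymptotic).

-- ===== PORT A =====
-- Python list indices here are always in range on every list condenseBT is applied to
-- inside bernoulliTriangle (seq is nonempty), so pyGetD … 0 is exact.
def condenseBT (l : List Int) : List Int :=
  if l = [1] then [1, 2]
  else if l = [1, 2] then [1, 3, 4]
  else
    let condList := (PySem.List.pyRange 0 ((l.length : Int) - 1) 1).foldl
      (fun acc i => acc ++ [PySem.List.pyGetD l i 0 + PySem.List.pyGetD l (i + 1) 0]) []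
    [1] ++ condList ++ [2 * PySem.List.pyGetD l ((l.length : Int) - 1) 0]

def bernoulliTriangle (n : Int) : List Int :=
  let seq : List Int := [1, 2]
  if n = 1 then [1]
  else if n = 2 then [1, 2]
  else (PySem.List.pyRange 0 (n - 2) 1).foldl (fun s _ => condenseBT s) seq

-- ===== PORT B =====
-- state (row, c, s): row built so far, c the current binomial coefficient, s the prefix sum
def bernoulliTriangle_alt (n : Int) : List Int :=
  if n = 1 then [1]
  else if n ≤ 2 then [1, 2]
  else
    ((PySem.List.pyRange 0 n 1).foldl
      (fun (st : List Int × Int × Int) j =>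
        let s := st.2.2 + st.2.1
        (st.1 ++ [s], PySem.Int.floordiv (st.2.1 * (n - 1 - j)) (j + 1), s))
      ([], 1, 0)).1

-- ===== PRECONDITION & SPEC =====
def Spec_bernoulliTriangle (n : Int) (out : List Int) : Prop := out = bernoulliTriangle_alt n
instance (n : Int) (out : List Int) : Decidable (Spec_bernoulliTriangle n out) := by unfold Spec_bernoulliTriangle; infer_instance

-- ===== CLAIM (what is proved, stated in full; the proofs are below) =====
def Claim_equal_bernoulliTriangle : Prop := ∀ (n : Int), Dom_bernoulliTriangle n → Spec_bernoulliTriangle n (bernoulliTriangle n)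

-- ===== LEMMAS AND PROOFS =====

/-- Partial sum of a row of Pascal's triangle. -/
def pvP (m k : Nat) : Nat := ∑ j ∈ Finset.range k, m.choose j

/-- Row `m` of the Bernoulli triangle: prefix sums of the binomial coefficients `C(m-1, ·)`. -/
def pvRow (m : Nat) : List Int := (List.range m).map (fun i => (pvP (m - 1) (i + 1) : Int))

theorem pvP_succ_succ (m : Nat) : ∀ k, pvP (m + 1) (k + 1) = pvP m k + pvP m (k + 1) := by
  intro k
  induction k with
  | zero => simp [pvP]
  | succ k ih =>
      have h1 : pvP (m + 1) (k + 1 + 1) = pvP (m + 1) (k + 1) + (m + 1).choose (k + 1) :=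
        Finset.sum_range_succ _ _
      have h2 : pvP m (k + 1 + 1) = pvP m (k + 1) + m.choose (k + 1) :=
        Finset.sum_range_succ _ _
      have h3 : pvP m (k + 1) = pvP m k + m.choose k := Finset.sum_range_succ _ _
      rw [h1, ih, Nat.choose_succ_succ, h2, h3]
      ring

theorem pvP_full (m : Nat) : pvP m (m + 1) = 2 ^ m := by
  simpa [pvP] using Nat.sum_range_choose m

theorem pvRow_length (m : Nat) : (pvRow m).length = m := by simp [pvRow]

theorem condense_row (m : Nat) (hm : 1 ≤ m) : condenseBT (pvRow m) = pvRow (m + 1) := by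
  match m, hm with
  | 1, _ => decide
  | 2, _ => decide
  | (m + 3), _ =>
      have hne1 : pvRow (m + 3) ≠ [1] := by
        intro h; have := congrArg List.length h; simp [pvRow_length] at this
      have hne2 : pvRow (m + 3) ≠ [1, 2] := by
        intro h; have := congrArg List.length h; simp [pvRow_length] at this
      rw [condenseBT, if_neg hne1, if_neg hne2]
      have hlen : ((pvRow (m + 3)).length : Int) - 1 = ((m + 2 : Nat) : Int) := by
        rw [pvRow_length]; push_cast; ring
      have hrange : PySem.List.pyRange 0 (((pvRow (m + 3)).length : Int) - 1) 1
          = (List.range (m + 2)).map (fun k : Nat => (k : Int)) := by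
        rw [hlen, PySem.List.pyRange_one]
        simp
        have ht : ((m : Int) + 2).toNat = m + 2 := by omega
        rw [ht]
      have hget : ∀ k : Nat, k < m + 3 → PySem.List.pyGetD (pvRow (m + 3)) (k : Int) 0
          = (pvP (m + 2) (k + 1) : Int) := by
        intro k hk
        rw [PySem.List.pyGetD_natCast]
        simp [pvRow, List.getD, hk]
      have hmid : (PySem.List.pyRange 0 (((pvRow (m + 3)).length : Int) - 1) 1).foldl
          (fun acc i => acc ++ [PySem.List.pyGetD (pvRow (m + 3)) i 0
            + PySem.List.pyGetD (pvRow (m + 3)) (i + 1) 0]) []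
          = (List.range (m + 2)).map
              (fun k : Nat => (pvP (m + 2) (k + 1) : Int) + (pvP (m + 2) (k + 2) : Int)) := by
        rw [hrange, PySem.List.foldl_append_singleton_eq_map, List.nil_append, List.map_map]
        refine List.map_congr_left ?_
        intro k hk
        have hk' : k < m + 2 := List.mem_range.mp hk
        have e1 := hget k (by omega)
        have e2 := hget (k + 1) (by omega)
        simp only [Function.comp]
        rw [e1]
        have : ((k : Int) + 1) = ((k + 1 : Nat) : Int) := by push_cast; ring
        rw [this, e2]
      have hlast : PySem.List.pyGetD (pvRow (m + 3)) (((pvRow (m + 3)).length : Int) - 1) 0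
          = (pvP (m + 2) (m + 3) : Int) := by
        rw [hlen]
        exact hget (m + 2) (by omega)
      rw [hmid, hlast]
      -- assemble: pvRow (m+4) = 1 :: middle ++ [last]
      have hrow : pvRow (m + 3 + 1)
          = (1 : Int) :: ((List.range (m + 2)).map (fun i : Nat => (pvP (m + 3) (i + 2) : Int))
              ++ [(pvP (m + 3) (m + 4) : Int)]) := by
        have htail : List.map ((fun i : Nat => (pvP (m + 3) (i + 1) : Int)) ∘ Nat.succ)
              (List.range (m + 3))
            = (List.range (m + 2)).map (fun i : Nat => (pvP (m + 3) (i + 2) : Int))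
              ++ [(pvP (m + 3) (m + 4) : Int)] := by
          rw [List.range_succ, List.map_append]
          congr 1
        show (List.range (m + 4)).map (fun i : Nat => (pvP (m + 3) (i + 1) : Int)) = _
        rw [List.range_succ_eq_map, List.map_cons, List.map_map, htail]
        norm_num [pvP]
      rw [hrow]
      simp only [List.cons_append, List.nil_append]
      congr 1
      congr 1
      · refine List.map_congr_left ?_
        intro k _
        have h := pvP_succ_succ (m + 2) (k + 1)
        norm_num at h
        rw [h]
        push_cast
        ring
      · have h1 : pvP (m + 2) (m + 3) = 2 ^ (m + 2) := by
          have := pvP_full (m + 2); norm_num at this; exact this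
        have h2 : pvP (m + 3) (m + 4) = 2 ^ (m + 3) := by
          have := pvP_full (m + 3); norm_num at this; exact this
        rw [h1, h2]
        push_cast
        ring

theorem foldl_const {α β : Type} (c : α → α) :
    ∀ (l : List β) (s : α), l.foldl (fun a _ => c a) s = c^[l.length] s := by
  intro l
  induction l with
  | nil => intro s; simp
  | cons x xs ih =>
      intro s
      simp [List.foldl_cons, ih, Function.iterate_succ_apply]

theorem iterate_condense (k : Nat) : condenseBT^[k] (pvRow 2) = pvRow (k + 2) := by
  induction k with
  | zero => rfl
  | succ k ih =>
      rw [Function.iterate_succ_apply', ih, condense_row (k + 2) (by omega)]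

theorem bernoulliTriangle_eq_row (n : Int) (hn : 3 ≤ n) :
    bernoulliTriangle n = pvRow n.toNat := by
  rw [bernoulliTriangle]
  rw [if_neg (by omega), if_neg (by omega)]
  have h2 : pvRow 2 = [1, 2] := by decide
  rw [← h2, foldl_const, PySem.List.length_pyRange_one, iterate_condense]
  congr 1
  omega

-- the loop invariant of B: after k steps the state is
-- (first k prefix sums, C(n-1,k), prefix sum of the first k binomials)
theorem alt_inv (n : Nat) :
    ∀ k, k ≤ n →
      ((List.range k).map (fun j : Nat => (j : Int))).foldl
        (fun (st : List Int × Int × Int) j =>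
          let s := st.2.2 + st.2.1
          (st.1 ++ [s], PySem.Int.floordiv (st.2.1 * ((n : Int) - 1 - j)) (j + 1), s))
        ([], 1, 0)
      = ((List.range k).map (fun i : Nat => (pvP (n - 1) (i + 1) : Int)),
          ((n - 1).choose k : Int), (pvP (n - 1) k : Int)) := by
  intro k
  induction k with
  | zero => intro _; simp [pvP]
  | succ k ih =>
      intro hk
      rw [List.range_succ, List.map_append, List.foldl_append, ih (by omega)]
      simp only [List.map_cons, List.map_nil, List.foldl_cons, List.foldl_nil]
      have hs : (pvP (n - 1) k : Int) + ((n - 1).choose k : Int)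
          = (pvP (n - 1) (k + 1) : Int) := by
        have h : pvP (n - 1) (k + 1) = pvP (n - 1) k + (n - 1).choose k :=
          Finset.sum_range_succ _ _
        rw [h]; push_cast; ring
      have hcast : ((n : Int) - 1 - (k : Int)) = ((n - 1 - k : Nat) : Int) := by omega
      have hchoose : (n - 1).choose k * (n - 1 - k) = (n - 1).choose (k + 1) * (k + 1) := by
        rw [Nat.choose_succ_right_eq]
      have hc : PySem.Int.floordiv (((n - 1).choose k : Int) * ((n : Int) - 1 - (k : Int)))
            ((k : Int) + 1) = ((n - 1).choose (k + 1) : Int) := by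
        rw [hcast]
        have e1 : (((n - 1).choose k : Nat) : Int) * ((n - 1 - k : Nat) : Int)
            = (((n - 1).choose k * (n - 1 - k) : Nat) : Int) := by push_cast; ring
        have e2 : ((k : Int) + 1) = ((k + 1 : Nat) : Int) := by push_cast; ring
        rw [e1, e2, PySem.Int.floordiv_natCast, hchoose, Nat.mul_div_cancel _ (by omega)]
      simp only [hs, hc]
      simp

theorem alt_eq_row (n : Int) (hn : 3 ≤ n) :
    bernoulliTriangle_alt n = pvRow n.toNat := by
  rw [bernoulliTriangle_alt, if_neg (by omega), if_neg (by omega)]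
  have hcast : n = ((n.toNat : Nat) : Int) := by omega
  rw [hcast, PySem.List.pyRange_one]
  have ht : ((((n.toNat : Nat) : Int)) - 0).toNat = n.toNat := by omega
  rw [ht]
  have hrange : ((List.range n.toNat).map (fun k : Nat => 0 + (k : Int)))
      = (List.range n.toNat).map (fun j : Nat => (j : Int)) := by
    refine List.map_congr_left ?_; intro k _; ring
  rw [hrange]
  have := alt_inv n.toNat n.toNat (le_refl _)
  rw [this]
  rfl

-- ===== VERDICT (by name: the statement is the Claim_ definition above) =====
theorem bernoulliTriangle_spec : Claim_equal_bernoulliTriangle := by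
  intro n _
  unfold Spec_bernoulliTriangle
  by_cases h1 : n = 1
  · subst h1; decide
  · by_cases h2 : n = 2
    · subst h2; decide
    · by_cases h3 : 3 ≤ n
      · rw [bernoulliTriangle_eq_row n h3, alt_eq_row n h3]
      · -- n ≤ 0: A's loop runs zero times and returns [1,2]; B's n ≤ 2 base returns [1,2]
        have hle : n ≤ 0 := by omega
        rw [bernoulliTriangle, if_neg h1, if_neg h2,
            bernoulliTriangle_alt, if_neg h1, if_pos (by omega)]
        rw [PySem.List.pyRange_one]
        have : (n - 2 - 0).toNat = 0 := by omega
        rw [this]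
        rfl
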